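-- pv_equiv track=rewrite | github.com/87tickly/turni-pdm | api/calendario_agente.py | _select_day_for_weekday
-- ===== SOURCE A (Python) =====
-- def _periodicita_matches(periodicita: str, weekday_letter: str) -> bool:
--     """True se la periodicita' (es. 'LMXGV', 'SD', 'S', 'LMXGVSD') include
--     la lettera del weekday richiesto."""
--     if not periodicita:
--         return False
--     p = periodicita.upper()
--     return weekday_letter.upper() in p
--
-- def _select_day_for_weekday(
--     turn_days: list[dict], weekday_letter: str,
-- ) -> dict | None:
--     """Sceglie il pdc_turn_day con periodicita' compatibile per il
--     weekday dato. Preferenza: match esatto della lettera (es. 'D' da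
--     una row con periodicita='D'), poi match ampio ('LMXGVSD').
--
--     Se non trova nulla, torna None (→ riposo).
--     """
--     # Priorita' 1: row con periodicita = solo quella lettera (es. 'S', 'D')
--     exact = [d for d in turn_days
--              if d.get("periodicita", "").upper() == weekday_letter]
--     if exact:
--         return exact[0]
--     # Priorita' 2: row con periodicita che include la lettera
--     matching = [d for d in turn_days
--                 if _periodicita_matches(d.get("periodicita", ""), weekday_letter)]
--     if matching:
--         # Se multiple, prendi la piu' specifica (piu' corta)
--         matching.sort(key=lambda d: len(d.get("periodicita", "") or ""))
--         return matching[0]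
--     return None
-- ===== SOURCE B (Python) =====
-- def _periodicita_matches(periodicita: str, weekday_letter: str) -> bool:
--     if not periodicita:
--         return False
--     return weekday_letter.upper() in periodicita.upper()
--
-- def _select_day_for_weekday(turn_days, weekday_letter):
--     # Single pass: track the first exact match and the best (shortest,
--     # first-on-tie) broad match; no intermediate lists, no sort.
--     first_exact = None
--     best = None
--     best_len = -1
--     for d in turn_days:
--         p = d.get("periodicita", "")
--         if first_exact is None and p.upper() == weekday_letter:
--             first_exact = d
--         if _periodicita_matches(p, weekday_letter):
--             if best is None or len(p) < best_len:
--                 best = d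
--                 best_len = len(p)
--     return first_exact if first_exact is not None else best
-- ===== Notes on version B (the rewrite author's own statement) =====
-- stated objective: alternative
-- what changed: Replaces A's two full filter passes plus a stable sort of the matching rows with a single loop over turn_days that tracks the first exact match and the shortest (first-on-tie) broad match.
import Mathlib
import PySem

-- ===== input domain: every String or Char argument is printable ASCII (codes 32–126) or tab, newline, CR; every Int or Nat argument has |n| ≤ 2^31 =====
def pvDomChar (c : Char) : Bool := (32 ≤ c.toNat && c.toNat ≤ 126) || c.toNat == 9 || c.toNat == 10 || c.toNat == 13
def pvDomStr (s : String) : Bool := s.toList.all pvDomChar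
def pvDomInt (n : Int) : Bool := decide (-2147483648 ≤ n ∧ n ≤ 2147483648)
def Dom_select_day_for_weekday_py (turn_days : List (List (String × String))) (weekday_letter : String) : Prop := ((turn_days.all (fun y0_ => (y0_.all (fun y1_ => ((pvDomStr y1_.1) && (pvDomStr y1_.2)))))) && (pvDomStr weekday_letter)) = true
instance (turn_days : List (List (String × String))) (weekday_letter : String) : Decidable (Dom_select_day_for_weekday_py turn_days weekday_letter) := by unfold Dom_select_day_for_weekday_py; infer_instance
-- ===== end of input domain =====

-- B replaces A's two filter passes + stable sort with one loop keeping the first exact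
-- match and the shortest (first-on-tie) broad match; return value only (A sorts a fresh
-- local list, no caller-visible mutation).

-- ===== PORT A =====
-- shared module helper _periodicita_matches (used verbatim by both Pythons)
def periodicita_matches (periodicita : String) (weekday_letter : String) : Bool :=
  if PySem.Str.len periodicita == 0 then false
  else PySem.Str.isIn (PySem.Str.upper weekday_letter) (PySem.Str.upper periodicita)

def select_day_for_weekday_py (turn_days : List (List (String × String))) (weekday_letter : String) : Option (List (String × String)) :=
  let exact := turn_days.filter (fun d => PySem.Str.upper (PySem.Dict.getD ⟨d⟩ "periodicita" "") == weekday_letter)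
  match exact with
  | e :: _ => some e
  | [] =>
    let matching := turn_days.filter (fun d => periodicita_matches (PySem.Dict.getD ⟨d⟩ "periodicita" "") weekday_letter)
    match PySem.List.sorted matching (fun d => PySem.Str.len (PySem.Dict.getD ⟨d⟩ "periodicita" "")) with
    | m :: _ => some m
    | [] => none

-- ===== PORT B =====
def select_day_for_weekday_py_alt (turn_days : List (List (String × String))) (weekday_letter : String) : Option (List (String × String)) :=
  let r := turn_days.foldl
    (fun (st : Option (List (String × String)) × Option (List (String × String))) d =>
      let p := PySem.Dict.getD ⟨d⟩ "periodicita" ""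
      let fe := match st.1 with
        | some e => some e
        | none => if PySem.Str.upper p == weekday_letter then some d else none
      let bm := if periodicita_matches p weekday_letter then
          match st.2 with
          | none => some d
          | some b => if PySem.Str.len p < PySem.Str.len (PySem.Dict.getD ⟨b⟩ "periodicita" "") then some d else st.2
        else st.2
      (fe, bm))
    (none, none)
  match r.1 with
  | some e => some e
  | none => r.2

-- ===== PRECONDITION & SPEC =====
def Spec_select_day_for_weekday_py (turn_days : List (List (String × String))) (weekday_letter : String) (out : Option (List (String × String))) : Prop := out = select_day_for_weekday_py_alt turn_days weekday_letter
instance (turn_days : List (List (String × String))) (weekday_letter : String) (out : Option (List (String × String))) : Decidable (Spec_select_day_for_weekday_py turn_days weekday_letter out) := by unfold Spec_select_day_for_weekday_py; infer_instance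

-- ===== CLAIM (what is proved, stated in full; the proofs are below) =====
def Claim_equal_select_day_for_weekday_py : Prop := ∀ (turn_days : List (List (String × String))) (weekday_letter : String), Dom_select_day_for_weekday_py turn_days weekday_letter → Spec_select_day_for_weekday_py turn_days weekday_letter (select_day_for_weekday_py turn_days weekday_letter)

-- ===== LEMMAS AND PROOFS =====

-- abbreviations for the proofs (not used by the ports)
def pvKey (d : List (String × String)) : Int := PySem.Str.len (PySem.Dict.getD ⟨d⟩ "periodicita" "")

def pvMinUpd (acc : Option (List (String × String))) (d : List (String × String)) : Option (List (String × String)) :=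
  match acc with
  | none => some d
  | some b => if pvKey d < pvKey b then some d else some b

def pvStepE (w : String) (e : Option (List (String × String))) (d : List (String × String)) : Option (List (String × String)) :=
  match e with
  | some x => some x
  | none => if PySem.Str.upper (PySem.Dict.getD ⟨d⟩ "periodicita" "") == w then some d else none

def pvStepB (w : String) (b : Option (List (String × String))) (d : List (String × String)) : Option (List (String × String)) :=
  if periodicita_matches (PySem.Dict.getD ⟨d⟩ "periodicita" "") w then pvMinUpd b d else b

theorem pv_fold_pair (w : String) (l : List (List (String × String)))
    (e b : Option (List (String × String))) :
    l.foldl (fun st d => (pvStepE w st.1 d, pvStepB w st.2 d)) (e, b)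
    = (l.foldl (pvStepE w) e, l.foldl (pvStepB w) b) := by
  induction l generalizing e b with
  | nil => rfl
  | cons a t ih => exact ih (pvStepE w e a) (pvStepB w b a)

theorem pv_foldE_some (w : String) (l : List (List (String × String))) (x : List (String × String)) :
    l.foldl (pvStepE w) (some x) = some x := by
  induction l with
  | nil => rfl
  | cons a t ih => simpa [pvStepE] using ih

theorem pv_foldE_eq_head_filter (w : String) (l : List (List (String × String))) :
    l.foldl (pvStepE w) none
      = (l.filter (fun d => PySem.Str.upper (PySem.Dict.getD ⟨d⟩ "periodicita" "") == w)).head? := by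
  induction l with
  | nil => rfl
  | cons a t ih =>
      by_cases h : (PySem.Str.upper (PySem.Dict.getD ⟨a⟩ "periodicita" "") == w) = true
      · simp [pvStepE, h, pv_foldE_some]
      · simp only [Bool.not_eq_true] at h
        simp [pvStepE, h, ih]

theorem pv_foldB_eq_filter (w : String) (l : List (List (String × String)))
    (b : Option (List (String × String))) :
    l.foldl (pvStepB w) b
      = (l.filter (fun d => periodicita_matches (PySem.Dict.getD ⟨d⟩ "periodicita" "") w)).foldl pvMinUpd b := by
  induction l generalizing b with
  | nil => rfl
  | cons a t ih =>
      by_cases h : periodicita_matches (PySem.Dict.getD ⟨a⟩ "periodicita" "") w = true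
      · simp [pvStepB, h, ih]
      · simp only [Bool.not_eq_true] at h
        simp [pvStepB, h, ih]

theorem pv_head_insertBy (x : List (String × String)) (s : List (List (String × String))) :
    (PySem.List.insertBy (fun a b => decide (pvKey a < pvKey b)) x s).head?
      = match s with
        | [] => some x
        | y :: _ => if pvKey x < pvKey y then some x else some y := by
  cases s with
  | nil => simp [PySem.List.insertBy]
  | cons y t =>
      by_cases h : pvKey x < pvKey y
      · simp [PySem.List.insertBy, h]
      · simp [PySem.List.insertBy, h]

theorem pv_head_sorted (zs : List (List (String × String))) :
    (PySem.List.sorted zs pvKey false).head? = zs.foldl pvMinUpd none := by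
  induction zs using List.reverseRecOn with
  | nil => rfl
  | append_singleton t z ih =>
      rw [List.foldl_append, PySem.List.sorted_eq_foldl_insertBy, List.foldl_append,
        ← PySem.List.sorted_eq_foldl_insertBy]
      simp only [List.foldl_cons, List.foldl_nil]
      rw [pv_head_insertBy]
      cases hs : PySem.List.sorted t pvKey false with
      | nil =>
          rw [hs] at ih
          simp only [List.head?_nil] at ih
          rw [← ih]
          rfl
      | cons m tail =>
          rw [hs] at ih
          simp only [List.head?_cons] at ih
          rw [← ih]
          simp [pvMinUpd]

theorem select_day_for_weekday_py_spec' (turn_days : List (List (String × String))) (weekday_letter : String) :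
    select_day_for_weekday_py turn_days weekday_letter
      = select_day_for_weekday_py_alt turn_days weekday_letter := by
  unfold select_day_for_weekday_py select_day_for_weekday_py_alt
  have hfun : (fun (st : Option (List (String × String)) × Option (List (String × String))) d =>
      let p := PySem.Dict.getD ⟨d⟩ "periodicita" ""
      let fe := match st.1 with
        | some e => some e
        | none => if PySem.Str.upper p == weekday_letter then some d else none
      let bm := if periodicita_matches p weekday_letter then
          match st.2 with
          | none => some d
          | some b => if PySem.Str.len p < PySem.Str.len (PySem.Dict.getD ⟨b⟩ "periodicita" "") then some d else st.2
        else st.2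
      (fe, bm))
      = fun st d => (pvStepE weekday_letter st.1 d, pvStepB weekday_letter st.2 d) := by
    funext st d
    obtain ⟨e, b⟩ := st
    cases e <;> cases b <;> simp [pvStepE, pvStepB, pvMinUpd, pvKey]
  rw [hfun, pv_fold_pair, pv_foldE_eq_head_filter, pv_foldB_eq_filter, ← pv_head_sorted]
  have hk : (fun d => PySem.Str.len (PySem.Dict.getD ⟨d⟩ "periodicita" "")) = pvKey := rfl
  rw [hk]
  cases he : turn_days.filter (fun d => PySem.Str.upper (PySem.Dict.getD ⟨d⟩ "periodicita" "") == weekday_letter) with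
  | cons e t => simp
  | nil =>
      simp only [List.head?_nil]
      cases hm : PySem.List.sorted (turn_days.filter (fun d => periodicita_matches (PySem.Dict.getD ⟨d⟩ "periodicita" "") weekday_letter)) pvKey false with
      | nil => rfl
      | cons m t => rfl

-- ===== VERDICT (by name: the statement is the Claim_ definition above) =====
theorem select_day_for_weekday_py_spec : Claim_equal_select_day_for_weekday_py := by
  intro tds w _
  exact select_day_for_weekday_py_spec' tds w
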